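-- pv_equiv track=rewrite | github.com/Collins76/IE-Asset-Dashboard | _build_network.py | normalize_props
-- ===== SOURCE A (Python) =====
-- FIELD_MAP = {
--     # Standard key -> list of source field name variants
--     'BU_NAME': ['BU_NAME', 'BU', 'Bu'],
--     'UT_NAME': ['UT_NAME', 'New_UT_Nam', 'UT'],
--     'DSS_NAME': ['DSS_NAME'],
--     'FED_NAME': ['FED_NAME'],
--     'FEEDER_NAME': ['FEEDER_NAME', 'Feeder_Nam', 'Feeder_Name', 'FEEDER_NAM'],
--     'DT_CODE': ['UNIQUE_NOM', 'CIS_DT_NAM', 'DT_CODE'],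
--     'CAPACITY': ['CAPACITY', 'Capacity'],
--     'OWNERSHIP': ['OWNERSHIP', 'Ownership'],
--     'INSTALL_POS': ['INSTALATION_POSITION', 'Installati', 'Installation', 'INSTALATIO', 'INSTL_POSI'],
--     'METERING': ['METERING_STATUS', 'Metering_S', 'Metering Status', 'METERING__'],
--     'METER_NO': ['METER_NUMBER', 'Meter_Numb', 'Meter_Number', 'METER_NUMB'],
--     'CONNECTION': ['CONNECTION', 'Connection', 'Connection Status', 'CONNECTION_STATUS', 'COMMUNICATION_STATUS', 'COMMUNICAT'],
--     'COMMISSION': ['COMMISSIONING_STATUS', 'Commission', 'Commissioning Status', 'COMMISSION'],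
--     'MAINTENANCE': ['MAINTENANCE', 'Maintenanc', 'MAINTENANC'],
--     'STATUS': ['DISCONNECTION_STATUS', 'Disconnect', 'Disconnection Status', 'DISCONNECT'],
--     'ADDRESS': ['ADDRESS', 'Addresses', 'Address'],
--     'LAT': ['DECIMAL_DEGREE_LAT', 'LAT1', 'LAT_DEC', 'Coordinates__LAT_', 'Coordinates (LAT)', 'DECIMAL_DE'],
--     'LONG': ['DECIMAL_DEGREE_LONG', 'LONG1', 'LONG_DEC', 'Coordinates__LONG_', 'Coordinates (LONG)', 'DECIMAL__1'],
--     'INJECTION': ['INJECTION'],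
--     'TOTAL_CAP': ['TOTAL CAP'],
--     'POWER_TX': ['POWER TRANSFORMER'],
--     'VOLT_RATIO': ['VOLTAGE__RATIO'],
--     'NUM_FEEDER': ['NUMBER OF FEEDER'],
--     'OP_CAPACITY': ['OPERATING_CAPACITY'],
--     'CIS_DT': ['CIS_DT_Num', 'CIS_ACCOUNT_NUMBER'],
--     'STATE': ['STATE'],
-- }
--
-- def normalize_props(parsed):
--     """Map variant field names to standard keys."""
--     result = {}
--     for std_key, variants in FIELD_MAP.items():
--         for v in variants:
--             if v in parsed and parsed[v] and str(parsed[v]).lower() not in ('', '<null>', '&lt;null&gt;', 'null', 'n/a'):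
--                 result[std_key] = parsed[v]
--                 break
--     return result
-- ===== SOURCE B (Python) =====
-- # Reverse index, precomputed once as a literal: variant field name -> (standard key, position
-- # in that key's variant list).  A single pass over parsed keeps, per standard key, the valid
-- # value whose variant position is smallest; output is emitted in standard-key order.
-- _REV = {
--     'BU_NAME': ('BU_NAME', 0),
--     'BU': ('BU_NAME', 1),
--     'Bu': ('BU_NAME', 2),
--     'UT_NAME': ('UT_NAME', 0),
--     'New_UT_Nam': ('UT_NAME', 1),
--     'UT': ('UT_NAME', 2),
--     'DSS_NAME': ('DSS_NAME', 0),
--     'FED_NAME': ('FED_NAME', 0),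
--     'FEEDER_NAME': ('FEEDER_NAME', 0),
--     'Feeder_Nam': ('FEEDER_NAME', 1),
--     'Feeder_Name': ('FEEDER_NAME', 2),
--     'FEEDER_NAM': ('FEEDER_NAME', 3),
--     'UNIQUE_NOM': ('DT_CODE', 0),
--     'CIS_DT_NAM': ('DT_CODE', 1),
--     'DT_CODE': ('DT_CODE', 2),
--     'CAPACITY': ('CAPACITY', 0),
--     'Capacity': ('CAPACITY', 1),
--     'OWNERSHIP': ('OWNERSHIP', 0),
--     'Ownership': ('OWNERSHIP', 1),
--     'INSTALATION_POSITION': ('INSTALL_POS', 0),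
--     'Installati': ('INSTALL_POS', 1),
--     'Installation': ('INSTALL_POS', 2),
--     'INSTALATIO': ('INSTALL_POS', 3),
--     'INSTL_POSI': ('INSTALL_POS', 4),
--     'METERING_STATUS': ('METERING', 0),
--     'Metering_S': ('METERING', 1),
--     'Metering Status': ('METERING', 2),
--     'METERING__': ('METERING', 3),
--     'METER_NUMBER': ('METER_NO', 0),
--     'Meter_Numb': ('METER_NO', 1),
--     'Meter_Number': ('METER_NO', 2),
--     'METER_NUMB': ('METER_NO', 3),
--     'CONNECTION': ('CONNECTION', 0),
--     'Connection': ('CONNECTION', 1),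
--     'Connection Status': ('CONNECTION', 2),
--     'CONNECTION_STATUS': ('CONNECTION', 3),
--     'COMMUNICATION_STATUS': ('CONNECTION', 4),
--     'COMMUNICAT': ('CONNECTION', 5),
--     'COMMISSIONING_STATUS': ('COMMISSION', 0),
--     'Commission': ('COMMISSION', 1),
--     'Commissioning Status': ('COMMISSION', 2),
--     'COMMISSION': ('COMMISSION', 3),
--     'MAINTENANCE': ('MAINTENANCE', 0),
--     'Maintenanc': ('MAINTENANCE', 1),
--     'MAINTENANC': ('MAINTENANCE', 2),
--     'DISCONNECTION_STATUS': ('STATUS', 0),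
--     'Disconnect': ('STATUS', 1),
--     'Disconnection Status': ('STATUS', 2),
--     'DISCONNECT': ('STATUS', 3),
--     'ADDRESS': ('ADDRESS', 0),
--     'Addresses': ('ADDRESS', 1),
--     'Address': ('ADDRESS', 2),
--     'DECIMAL_DEGREE_LAT': ('LAT', 0),
--     'LAT1': ('LAT', 1),
--     'LAT_DEC': ('LAT', 2),
--     'Coordinates__LAT_': ('LAT', 3),
--     'Coordinates (LAT)': ('LAT', 4),
--     'DECIMAL_DE': ('LAT', 5),
--     'DECIMAL_DEGREE_LONG': ('LONG', 0),
--     'LONG1': ('LONG', 1),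
--     'LONG_DEC': ('LONG', 2),
--     'Coordinates__LONG_': ('LONG', 3),
--     'Coordinates (LONG)': ('LONG', 4),
--     'DECIMAL__1': ('LONG', 5),
--     'INJECTION': ('INJECTION', 0),
--     'TOTAL CAP': ('TOTAL_CAP', 0),
--     'POWER TRANSFORMER': ('POWER_TX', 0),
--     'VOLTAGE__RATIO': ('VOLT_RATIO', 0),
--     'NUMBER OF FEEDER': ('NUM_FEEDER', 0),
--     'OPERATING_CAPACITY': ('OP_CAPACITY', 0),
--     'CIS_DT_Num': ('CIS_DT', 0),
--     'CIS_ACCOUNT_NUMBER': ('CIS_DT', 1),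
--     'STATE': ('STATE', 0),
-- }
--
-- _STD = ['BU_NAME', 'UT_NAME', 'DSS_NAME', 'FED_NAME', 'FEEDER_NAME', 'DT_CODE', 'CAPACITY', 'OWNERSHIP', 'INSTALL_POS', 'METERING', 'METER_NO', 'CONNECTION', 'COMMISSION', 'MAINTENANCE', 'STATUS', 'ADDRESS', 'LAT', 'LONG', 'INJECTION', 'TOTAL_CAP', 'POWER_TX', 'VOLT_RATIO', 'NUM_FEEDER', 'OP_CAPACITY', 'CIS_DT', 'STATE']
--
--
-- def _valid(value):
--     if not value:
--         return False
--     lv = str(value).lower()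
--     return lv != '' and lv != '<null>' and lv != '&lt;null&gt;' and lv != 'null' and lv != 'n/a'
--
--
-- def normalize_props(parsed):
--     """Map variant field names to standard keys (single pass over parsed)."""
--     best = {}
--     for name, value in parsed.items():
--         hit = _REV.get(name)
--         if hit is None:
--             continue
--         if _valid(value):
--             std, idx = hit
--             cur = best.get(std)
--             if cur is None or idx < cur[0]:
--                 best[std] = (idx, value)
--     return {std: best[std][1] for std in _STD if std in best}
-- ===== Notes on version B (the rewrite author's own statement) =====
-- stated objective: alternative
-- what changed: Instead of A's nested scan over FIELD_MAP with a dict probe per variant, B carries a precomputed literal reverse index variant-name -> (std_key, variant-position), makes a single pass over parsed.items() keeping per std_key the valid value with the smallest variant position, and emits the kept values in standard-key order; Pre_ excludes association lists with duplicate keys, which a Python dict cannot contain, so first-vs-last occurrence behaviour there is accidental to the list model.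
import Mathlib
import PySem

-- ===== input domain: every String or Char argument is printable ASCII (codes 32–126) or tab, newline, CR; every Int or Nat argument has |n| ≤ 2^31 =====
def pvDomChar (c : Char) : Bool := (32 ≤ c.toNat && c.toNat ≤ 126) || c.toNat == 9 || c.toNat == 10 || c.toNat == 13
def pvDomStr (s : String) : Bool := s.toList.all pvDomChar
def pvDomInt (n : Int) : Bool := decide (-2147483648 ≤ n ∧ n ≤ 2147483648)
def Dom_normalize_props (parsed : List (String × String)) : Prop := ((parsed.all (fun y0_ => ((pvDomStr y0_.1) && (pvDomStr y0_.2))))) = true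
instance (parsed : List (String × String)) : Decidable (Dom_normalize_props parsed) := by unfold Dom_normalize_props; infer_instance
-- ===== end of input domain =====

-- B replaces A's nested FIELD_MAP scan by a precomputed literal reverse index and a single pass
-- over parsed keeping, per standard key, the valid value of smallest variant position
-- (alternative decomposition, same results).

-- ===== PORT A =====
def pvFieldMap : List (String × List String) := [
  ("BU_NAME", ["BU_NAME", "BU", "Bu"]),
  ("UT_NAME", ["UT_NAME", "New_UT_Nam", "UT"]),
  ("DSS_NAME", ["DSS_NAME"]),
  ("FED_NAME", ["FED_NAME"]),
  ("FEEDER_NAME", ["FEEDER_NAME", "Feeder_Nam", "Feeder_Name", "FEEDER_NAM"]),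
  ("DT_CODE", ["UNIQUE_NOM", "CIS_DT_NAM", "DT_CODE"]),
  ("CAPACITY", ["CAPACITY", "Capacity"]),
  ("OWNERSHIP", ["OWNERSHIP", "Ownership"]),
  ("INSTALL_POS", ["INSTALATION_POSITION", "Installati", "Installation", "INSTALATIO", "INSTL_POSI"]),
  ("METERING", ["METERING_STATUS", "Metering_S", "Metering Status", "METERING__"]),
  ("METER_NO", ["METER_NUMBER", "Meter_Numb", "Meter_Number", "METER_NUMB"]),
  ("CONNECTION", ["CONNECTION", "Connection", "Connection Status", "CONNECTION_STATUS", "COMMUNICATION_STATUS", "COMMUNICAT"]),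
  ("COMMISSION", ["COMMISSIONING_STATUS", "Commission", "Commissioning Status", "COMMISSION"]),
  ("MAINTENANCE", ["MAINTENANCE", "Maintenanc", "MAINTENANC"]),
  ("STATUS", ["DISCONNECTION_STATUS", "Disconnect", "Disconnection Status", "DISCONNECT"]),
  ("ADDRESS", ["ADDRESS", "Addresses", "Address"]),
  ("LAT", ["DECIMAL_DEGREE_LAT", "LAT1", "LAT_DEC", "Coordinates__LAT_", "Coordinates (LAT)", "DECIMAL_DE"]),
  ("LONG", ["DECIMAL_DEGREE_LONG", "LONG1", "LONG_DEC", "Coordinates__LONG_", "Coordinates (LONG)", "DECIMAL__1"]),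
  ("INJECTION", ["INJECTION"]),
  ("TOTAL_CAP", ["TOTAL CAP"]),
  ("POWER_TX", ["POWER TRANSFORMER"]),
  ("VOLT_RATIO", ["VOLTAGE__RATIO"]),
  ("NUM_FEEDER", ["NUMBER OF FEEDER"]),
  ("OP_CAPACITY", ["OPERATING_CAPACITY"]),
  ("CIS_DT", ["CIS_DT_Num", "CIS_ACCOUNT_NUMBER"]),
  ("STATE", ["STATE"])]

-- the shared validity test: `parsed[v] and str(parsed[v]).lower() not in ('', '<null>', '&lt;null&gt;', 'null', 'n/a')`
def pvValid (s : String) : Bool :=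
  (s != "") && !([("" : String), "<null>", "&lt;null&gt;", "null", "n/a"].contains (PySem.Str.lower s))

-- A's inner `for v in variants: … break` loop
def pvFirstValid (d : PySem.Dict String String) : List String → Option String
  | [] => none
  | v :: vs =>
    match d.get? v with
    | some val => if pvValid val then some val else pvFirstValid d vs
    | none => pvFirstValid d vs

def normalize_props (parsed : List (String × String)) : List (String × String) :=
  (pvFieldMap.foldl (fun (result : PySem.Dict String String) kv =>
      match pvFirstValid (PySem.Dict.mk parsed) kv.2 with
      | some val => result.insert kv.1 val
      | none => result) PySem.Dict.empty).items

-- ===== PORT B =====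
def pvRevTable : List (String × String × Int) := [
  ("BU_NAME", ("BU_NAME", 0)),
  ("BU", ("BU_NAME", 1)),
  ("Bu", ("BU_NAME", 2)),
  ("UT_NAME", ("UT_NAME", 0)),
  ("New_UT_Nam", ("UT_NAME", 1)),
  ("UT", ("UT_NAME", 2)),
  ("DSS_NAME", ("DSS_NAME", 0)),
  ("FED_NAME", ("FED_NAME", 0)),
  ("FEEDER_NAME", ("FEEDER_NAME", 0)),
  ("Feeder_Nam", ("FEEDER_NAME", 1)),
  ("Feeder_Name", ("FEEDER_NAME", 2)),
  ("FEEDER_NAM", ("FEEDER_NAME", 3)),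
  ("UNIQUE_NOM", ("DT_CODE", 0)),
  ("CIS_DT_NAM", ("DT_CODE", 1)),
  ("DT_CODE", ("DT_CODE", 2)),
  ("CAPACITY", ("CAPACITY", 0)),
  ("Capacity", ("CAPACITY", 1)),
  ("OWNERSHIP", ("OWNERSHIP", 0)),
  ("Ownership", ("OWNERSHIP", 1)),
  ("INSTALATION_POSITION", ("INSTALL_POS", 0)),
  ("Installati", ("INSTALL_POS", 1)),
  ("Installation", ("INSTALL_POS", 2)),
  ("INSTALATIO", ("INSTALL_POS", 3)),
  ("INSTL_POSI", ("INSTALL_POS", 4)),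
  ("METERING_STATUS", ("METERING", 0)),
  ("Metering_S", ("METERING", 1)),
  ("Metering Status", ("METERING", 2)),
  ("METERING__", ("METERING", 3)),
  ("METER_NUMBER", ("METER_NO", 0)),
  ("Meter_Numb", ("METER_NO", 1)),
  ("Meter_Number", ("METER_NO", 2)),
  ("METER_NUMB", ("METER_NO", 3)),
  ("CONNECTION", ("CONNECTION", 0)),
  ("Connection", ("CONNECTION", 1)),
  ("Connection Status", ("CONNECTION", 2)),
  ("CONNECTION_STATUS", ("CONNECTION", 3)),
  ("COMMUNICATION_STATUS", ("CONNECTION", 4)),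
  ("COMMUNICAT", ("CONNECTION", 5)),
  ("COMMISSIONING_STATUS", ("COMMISSION", 0)),
  ("Commission", ("COMMISSION", 1)),
  ("Commissioning Status", ("COMMISSION", 2)),
  ("COMMISSION", ("COMMISSION", 3)),
  ("MAINTENANCE", ("MAINTENANCE", 0)),
  ("Maintenanc", ("MAINTENANCE", 1)),
  ("MAINTENANC", ("MAINTENANCE", 2)),
  ("DISCONNECTION_STATUS", ("STATUS", 0)),
  ("Disconnect", ("STATUS", 1)),
  ("Disconnection Status", ("STATUS", 2)),
  ("DISCONNECT", ("STATUS", 3)),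
  ("ADDRESS", ("ADDRESS", 0)),
  ("Addresses", ("ADDRESS", 1)),
  ("Address", ("ADDRESS", 2)),
  ("DECIMAL_DEGREE_LAT", ("LAT", 0)),
  ("LAT1", ("LAT", 1)),
  ("LAT_DEC", ("LAT", 2)),
  ("Coordinates__LAT_", ("LAT", 3)),
  ("Coordinates (LAT)", ("LAT", 4)),
  ("DECIMAL_DE", ("LAT", 5)),
  ("DECIMAL_DEGREE_LONG", ("LONG", 0)),
  ("LONG1", ("LONG", 1)),
  ("LONG_DEC", ("LONG", 2)),
  ("Coordinates__LONG_", ("LONG", 3)),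
  ("Coordinates (LONG)", ("LONG", 4)),
  ("DECIMAL__1", ("LONG", 5)),
  ("INJECTION", ("INJECTION", 0)),
  ("TOTAL CAP", ("TOTAL_CAP", 0)),
  ("POWER TRANSFORMER", ("POWER_TX", 0)),
  ("VOLTAGE__RATIO", ("VOLT_RATIO", 0)),
  ("NUMBER OF FEEDER", ("NUM_FEEDER", 0)),
  ("OPERATING_CAPACITY", ("OP_CAPACITY", 0)),
  ("CIS_DT_Num", ("CIS_DT", 0)),
  ("CIS_ACCOUNT_NUMBER", ("CIS_DT", 1)),
  ("STATE", ("STATE", 0))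
]

def pvStdOrder : List String := [
  "BU_NAME",
  "UT_NAME",
  "DSS_NAME",
  "FED_NAME",
  "FEEDER_NAME",
  "DT_CODE",
  "CAPACITY",
  "OWNERSHIP",
  "INSTALL_POS",
  "METERING",
  "METER_NO",
  "CONNECTION",
  "COMMISSION",
  "MAINTENANCE",
  "STATUS",
  "ADDRESS",
  "LAT",
  "LONG",
  "INJECTION",
  "TOTAL_CAP",
  "POWER_TX",
  "VOLT_RATIO",
  "NUM_FEEDER",
  "OP_CAPACITY",
  "CIS_DT",
  "STATE"
]

def pvRevD : PySem.Dict String (String × Int) := PySem.Dict.mk pvRevTable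

-- Source B's `_valid`
def pvValidAlt (s : String) : Bool :=
  if s == "" then false
  else
    let lv := PySem.Str.lower s
    lv != "" && lv != "<null>" && lv != "&lt;null&gt;" && lv != "null" && lv != "n/a"

def normalize_props_alt (parsed : List (String × String)) : List (String × String) :=
  let best := parsed.foldl (fun (b : PySem.Dict String (Int × String)) p =>
      match pvRevD.get? p.1 with
      | none => b
      | some hit =>
        if pvValidAlt p.2 then
          match b.get? hit.1 with
          | none => b.insert hit.1 (hit.2, p.2)
          | some cur => if hit.2 < cur.1 then b.insert hit.1 (hit.2, p.2) else b
        else b) PySem.Dict.empty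
  (pvStdOrder.foldl (fun (r : PySem.Dict String String) std =>
      match best.get? std with
      | some iv => r.insert std iv.2
      | none => r) PySem.Dict.empty).items

-- ===== PRECONDITION & SPEC =====
-- Pre_ excludes association lists with duplicate keys: parsed models a Python dict, which cannot
-- contain them, and first-vs-last occurrence behaviour on such lists is accidental to the list model.
def Pre_normalize_props (parsed : List (String × String)) : Prop := (parsed.map Prod.fst).Nodup
instance (parsed : List (String × String)) : Decidable (Pre_normalize_props parsed) := by unfold Pre_normalize_props; infer_instance
def pvWitness_normalize_props : (List (String × String)) := [("BU", "Ikeja"), ("LAT1", "6.5")]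
def Spec_normalize_props (parsed : List (String × String)) (out : List (String × String)) : Prop := out = normalize_props_alt parsed
instance (parsed : List (String × String)) (out : List (String × String)) : Decidable (Spec_normalize_props parsed out) := by unfold Spec_normalize_props; infer_instance

-- ===== CLAIM (what is proved, stated in full; the proofs are below) =====
def Claim_equal_normalize_props : Prop := ∀ (parsed : List (String × String)), Dom_normalize_props parsed → Pre_normalize_props parsed → Spec_normalize_props parsed (normalize_props parsed)

-- ===== LEMMAS AND PROOFS =====

-- Source B's validity test agrees with A's
theorem pvValid_eq : ∀ s, pvValidAlt s = pvValid s := by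
  intro s
  unfold pvValidAlt pvValid
  by_cases h : s = ""
  · subst h; rfl
  · simp only [beq_iff_eq, h, if_false, bne, List.contains_cons, List.contains_nil,
      Bool.or_false, Bool.not_or, Bool.and_assoc]
    simp [h]

-- the std-key order is the key column of FIELD_MAP
theorem pvStdOrder_eq : pvStdOrder = pvFieldMap.map Prod.fst := by rfl

-- B's per-item update, restricted to the single standard key k (the value best.get? k evolves by)
def pvOstep (k : String) (acc : Option (Int × String)) (p : String × String) : Option (Int × String) :=
  match pvRevD.get? p.1 with
  | none => acc
  | some hit =>
    if pvValid p.2 then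
      if hit.1 = k then
        match acc with
        | none => some (hit.2, p.2)
        | some cur => if hit.2 < cur.1 then some (hit.2, p.2) else some cur
      else acc
    else acc

theorem pvOstep_eq_none (k : String) (acc : Option (Int × String)) (p : String × String)
    (h : pvRevD.get? p.1 = none) : pvOstep k acc p = acc := by
  unfold pvOstep; rw [h]

theorem pvOstep_eq_some (k : String) (acc : Option (Int × String)) (p : String × String)
    (hit : String × Int) (h : pvRevD.get? p.1 = some hit) :
    pvOstep k acc p =
      if pvValid p.2 then
        if hit.1 = k then
          match acc with
          | none => some (hit.2, p.2)
          | some cur => if hit.2 < cur.1 then some (hit.2, p.2) else some cur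
        else acc
      else acc := by
  unfold pvOstep; rw [h]

-- candidates for key k contributed by the pairs of L
def pvC (L : List (String × String)) (k : String) (i : Int) (v : String) : Prop :=
  ∃ p ∈ L, pvRevD.get? p.1 = some (k, i) ∧ p.2 = v ∧ pvValid v = true

-- "o is a minimal-index candidate (or none if there is no candidate)"
abbrev pvIsMin (C : Int → String → Prop) (o : Option (Int × String)) : Prop :=
  (o = none → ∀ i v, ¬ C i v) ∧
  (∀ iv, o = some iv → C iv.1 iv.2 ∧ ∀ j w, C j w → iv.1 ≤ j)

theorem pvIsMin_congr (C C' : Int → String → Prop) (o : Option (Int × String))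
    (hiff : ∀ i v, C i v ↔ C' i v) (h : pvIsMin C o) : pvIsMin C' o := by
  refine ⟨fun ho i v hc => h.1 ho i v ((hiff i v).mpr hc), fun iv ho => ?_⟩
  exact ⟨(hiff _ _).mp (h.2 iv ho).1, fun j w hj => (h.2 iv ho).2 j w ((hiff j w).mpr hj)⟩

-- indexed version of A's inner loop (proof device)
def pvFvIdx (d : PySem.Dict String String) : List String → Int → Option (Int × String)
  | [], _ => none
  | v :: vs, n =>
    match d.get? v with
    | some val => if pvValid val then some (n, val) else pvFvIdx d vs (n + 1)
    | none => pvFvIdx d vs (n + 1)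

theorem pvFvIdx_cons_none (d : PySem.Dict String String) (v : String) (ws : List String) (n : Int)
    (h : d.get? v = none) : pvFvIdx d (v :: ws) n = pvFvIdx d ws (n + 1) := by
  conv_lhs => unfold pvFvIdx
  rw [h]

theorem pvFvIdx_cons_some (d : PySem.Dict String String) (v : String) (ws : List String) (n : Int)
    (val : String) (h : d.get? v = some val) :
    pvFvIdx d (v :: ws) n = if pvValid val then some (n, val) else pvFvIdx d ws (n + 1) := by
  conv_lhs => unfold pvFvIdx
  rw [h]

-- candidates for the variant suffix ws at index offset n, looked up in d
def pvC' (d : PySem.Dict String String) (ws : List String) (n : Int) (i : Int) (v : String) : Prop :=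
  ∃ m : Nat, m < ws.length ∧ i = n + m ∧ d.get? (ws.getD m "") = some v ∧ pvValid v = true

-- concrete facts about the reverse index (checked by the kernel)
set_option maxRecDepth 100000 in
set_option maxHeartbeats 1000000 in
theorem pvRev_fwd : ∀ kv ∈ pvFieldMap, ∀ m ∈ List.range kv.2.length,
    pvRevD.get? (kv.2.getD m "") = some (kv.1, (m : Int)) := by decide

set_option maxRecDepth 100000 in
set_option maxHeartbeats 1000000 in
theorem pvRev_bwd : ∀ q ∈ pvRevD.items, ∀ kv ∈ pvFieldMap, q.2.1 = kv.1 →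
    0 ≤ q.2.2 ∧ q.2.2.toNat < kv.2.length ∧ kv.2.getD q.2.2.toNat "" = q.1 := by decide

-- B's dict-valued fold, observed at one key, is the option-valued fold pvOstep
set_option maxRecDepth 4096 in
theorem pv_best_get (L : List (String × String)) (b : PySem.Dict String (Int × String)) (k : String) :
    (L.foldl (fun (b : PySem.Dict String (Int × String)) p =>
      match pvRevD.get? p.1 with
      | none => b
      | some hit =>
        if pvValid p.2 then
          match b.get? hit.1 with
          | none => b.insert hit.1 (hit.2, p.2)
          | some cur => if hit.2 < cur.1 then b.insert hit.1 (hit.2, p.2) else b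
        else b) b).get? k = L.foldl (pvOstep k) (b.get? k) := by
  induction L generalizing b with
  | nil => rfl
  | cons p L ih =>
    simp only [List.foldl_cons]
    rw [ih]
    congr 1
    cases h : pvRevD.get? p.1 with
    | none => rw [pvOstep_eq_none _ _ _ h]
    | some hit =>
      rw [pvOstep_eq_some _ _ _ _ h]
      dsimp only
      by_cases hv : pvValid p.2 = true
      · rw [if_pos hv, if_pos hv]
        by_cases hk : hit.1 = k
        · subst hk
          cases hb : b.get? hit.1 with
          | none => simp [PySem.Dict.get?_insert_self]
          | some cur =>
            by_cases hlt : hit.2 < cur.1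
            · simp [hlt, PySem.Dict.get?_insert_self]
            · simp [hlt, hb]
        · cases hb : b.get? hit.1 with
          | none => rw [if_neg hk, PySem.Dict.get?_insert_of_ne _ _ (Ne.symm hk)]
          | some cur =>
            rw [if_neg hk]
            by_cases hlt : hit.2 < cur.1
            · simp only [hlt, if_true]
              rw [PySem.Dict.get?_insert_of_ne _ _ (Ne.symm hk)]
            · simp only [hlt, if_false]
      · rw [if_neg hv, if_neg hv]

-- one pvOstep step preserves minimality, for the candidate set grown by p
theorem pv_step (k : String) (p : String × String) (C C' : Int → String → Prop)
    (o : Option (Int × String))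
    (hC' : ∀ i v, C' i v ↔ (C i v ∨ (pvRevD.get? p.1 = some (k, i) ∧ p.2 = v ∧ pvValid p.2 = true)))
    (h : pvIsMin C o) : pvIsMin C' (pvOstep k o p) := by
  cases hr : pvRevD.get? p.1 with
  | none =>
    rw [pvOstep_eq_none _ _ _ hr]
    refine pvIsMin_congr C C' o (fun i v => ?_) h
    rw [hC']
    constructor
    · exact Or.inl
    · rintro (hc | ⟨h1, _, _⟩)
      · exact hc
      · rw [hr] at h1; cases h1
  | some hit =>
    by_cases hv : pvValid p.2 = true
    · rw [pvOstep_eq_some _ _ _ _ hr, if_pos hv]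
      by_cases hk : hit.1 = k
      · rw [if_pos hk]
        cases o with
        | none =>
          show pvIsMin C' (some (hit.2, p.2))
          have hcand : C' hit.2 p.2 := by
            rw [hC']
            refine Or.inr ⟨?_, rfl, hv⟩
            rw [hr, ← hk]
          refine ⟨fun ho => (nomatch ho), fun iv ho => ?_⟩
          injection ho with ho; subst ho
          refine ⟨hcand, fun j w hj => ?_⟩
          rcases (hC' j w).mp hj with hc | ⟨h1, _, _⟩
          · exact absurd hc (h.1 rfl j w)
          · rw [hr] at h1; injection h1 with h1
            simp [h1]
        | some cur =>
          show pvIsMin C' (if hit.2 < cur.1 then some (hit.2, p.2) else some cur)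
          have hcur := h.2 cur rfl
          by_cases hlt : hit.2 < cur.1
          · rw [if_pos hlt]
            have hcand : C' hit.2 p.2 := by
              rw [hC']
              refine Or.inr ⟨?_, rfl, hv⟩
              rw [hr, ← hk]
            refine ⟨fun ho => (nomatch ho), fun iv ho => ?_⟩
            injection ho with ho; subst ho
            refine ⟨hcand, fun j w hj => ?_⟩
            rcases (hC' j w).mp hj with hc | ⟨h1, _, _⟩
            · exact le_trans (le_of_lt hlt) (hcur.2 j w hc)
            · rw [hr] at h1; injection h1 with h1
              simp [h1]
          · rw [if_neg hlt]
            refine ⟨fun ho => (nomatch ho), fun iv ho => ?_⟩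
            injection ho with ho; subst ho
            refine ⟨(hC' _ _).mpr (Or.inl hcur.1), fun j w hj => ?_⟩
            rcases (hC' j w).mp hj with hc | ⟨h1, _, _⟩
            · exact hcur.2 j w hc
            · rw [hr] at h1; injection h1 with h1
              have hj2 : hit.2 = j := by rw [h1]
              omega
      · rw [if_neg hk]
        refine pvIsMin_congr C C' o (fun i v => ?_) h
        rw [hC']
        constructor
        · exact Or.inl
        · rintro (hc | ⟨h1, _, _⟩)
          · exact hc
          · rw [hr] at h1; injection h1 with h1
            exact absurd (congrArg Prod.fst h1) hk
    · rw [pvOstep_eq_some _ _ _ _ hr, if_neg hv]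
      refine pvIsMin_congr C C' o (fun i v => ?_) h
      rw [hC']
      constructor
      · exact Or.inl
      · rintro (hc | ⟨_, _, h3⟩)
        · exact hc
        · exact absurd h3 hv

theorem pv_fold_isMin (k : String) (L : List (String × String)) :
    pvIsMin (pvC L k) (L.foldl (pvOstep k) none) := by
  induction L using List.reverseRecOn with
  | nil =>
    refine ⟨fun _ i v hc => ?_, fun iv ho => nomatch ho⟩
    rcases hc with ⟨p, hp, _⟩
    simp at hp
  | append_singleton L p ih =>
    rw [List.foldl_append, List.foldl_cons, List.foldl_nil]
    refine pv_step k p (pvC L k) (pvC (L ++ [p]) k) _ (fun i v => ?_) ih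
    constructor
    · rintro ⟨q, hq, h1, h2, h3⟩
      rcases List.mem_append.mp hq with hq | hq
      · exact Or.inl ⟨q, hq, h1, h2, h3⟩
      · rcases List.mem_singleton.mp hq with rfl
        exact Or.inr ⟨h1, h2, h2 ▸ h3⟩
    · rintro (⟨q, hq, h1, h2, h3⟩ | ⟨h1, h2, h3⟩)
      · exact ⟨q, List.mem_append.mpr (Or.inl hq), h1, h2, h3⟩
      · exact ⟨p, List.mem_append.mpr (Or.inr (List.mem_singleton.mpr rfl)), h1, h2, h2 ▸ h3⟩

theorem pv_firstValid_eq_fvIdx (d : PySem.Dict String String) :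
    ∀ (ws : List String) (n : Int), pvFirstValid d ws = (pvFvIdx d ws n).map Prod.snd := by
  intro ws
  induction ws with
  | nil => intro n; rfl
  | cons v ws ih =>
    intro n
    cases hg : d.get? v with
    | none =>
      rw [pvFvIdx_cons_none _ _ _ _ hg, ← ih (n + 1)]
      conv_lhs => unfold pvFirstValid
      rw [hg]
    | some val =>
      rw [pvFvIdx_cons_some _ _ _ _ _ hg]
      by_cases hv : pvValid val = true
      · rw [if_pos hv]
        conv_lhs => unfold pvFirstValid
        rw [hg]
        dsimp only
        rw [if_pos hv]
        rfl
      · rw [if_neg hv, ← ih (n + 1)]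
        conv_lhs => unfold pvFirstValid
        rw [hg]
        dsimp only
        rw [if_neg hv]

theorem pv_fvIdx_isMin (d : PySem.Dict String String) :
    ∀ (ws : List String) (n : Int), pvIsMin (pvC' d ws n) (pvFvIdx d ws n) := by
  intro ws
  induction ws with
  | nil =>
    refine fun n => ⟨fun _ i v hc => ?_, fun iv ho => nomatch ho⟩
    rcases hc with ⟨m, hm, _⟩
    simp at hm
  | cons v ws ih =>
    intro n
    have hshift : (∀ w', d.get? v = some w' → pvValid w' = false) →
        ∀ i w, pvC' d ws (n + 1) i w ↔ pvC' d (v :: ws) n i w := by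
      intro hno i w
      constructor
      · rintro ⟨m, hm, h1, h2, h3⟩
        exact ⟨m + 1, by simpa using hm, by push_cast at h1 ⊢; omega, by simpa using h2, h3⟩
      · rintro ⟨m, hm, h1, h2, h3⟩
        cases m with
        | zero =>
          exfalso
          simp only [List.getD_cons_zero] at h2
          exact absurd h3 (Bool.eq_false_iff.mp (hno w h2))
        | succ m' =>
          exact ⟨m', by simpa using hm, by push_cast at h1 ⊢; omega,
            by simpa using h2, h3⟩
    cases hg : d.get? v with
    | none =>
      rw [pvFvIdx_cons_none _ _ _ _ hg]
      refine pvIsMin_congr _ _ _ (hshift (fun w' hc => by rw [hg] at hc; cases hc)) (ih (n + 1))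
    | some val =>
      rw [pvFvIdx_cons_some _ _ _ _ _ hg]
      by_cases hv : pvValid val = true
      · rw [if_pos hv]
        refine ⟨fun ho => (nomatch ho), fun iv ho => ?_⟩
        injection ho with ho; subst ho
        refine ⟨⟨0, by simp, by simp, by simpa using hg, hv⟩, ?_⟩
        rintro j w ⟨m, hm, h1, _, _⟩
        omega
      · rw [if_neg hv]
        refine pvIsMin_congr _ _ _ (hshift ?_) (ih (n + 1))
        intro w' hc
        rw [hg] at hc; injection hc with hc; subst hc
        exact Bool.eq_false_iff.mpr hv

-- the two candidate notions coincide on a duplicate-free parsed list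
theorem pv_cand_iff (L : List (String × String)) (hnd : (L.map Prod.fst).Nodup)
    (k : String) (vs : List String) (hkv : (k, vs) ∈ pvFieldMap) (i : Int) (v : String) :
    pvC L k i v ↔ pvC' (PySem.Dict.mk L) vs 0 i v := by
  have hkeys : (PySem.Dict.mk L).keys.Nodup := by
    simpa [PySem.Dict.keys] using hnd
  constructor
  · rintro ⟨p, hp, h1, rfl, h3⟩
    have hq := PySem.Dict.mem_items_of_get?_eq_some (d := pvRevD) h1
    have hb := pvRev_bwd (p.1, (k, i)) hq (k, vs) hkv rfl
    dsimp only at hb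
    obtain ⟨hb0, hb1, hb2⟩ := hb
    refine ⟨i.toNat, hb1, by omega, ?_, h3⟩
    rw [hb2]
    exact (PySem.Dict.get?_eq_some_iff_mem_items (PySem.Dict.mk L) p.1 p.2 hkeys).mpr
      (by simpa using hp)
  · rintro ⟨m, hm, h1, h2, h3⟩
    refine ⟨(vs.getD m "", v), ?_, ?_, rfl, h3⟩
    · simpa using PySem.Dict.mem_items_of_get?_eq_some (d := PySem.Dict.mk L) h2
    · have hf := pvRev_fwd (k, vs) hkv m (List.mem_range.mpr hm)
      have him : i = (m : Int) := by omega
      rw [hf, him]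

-- pvC' determines the value at each index
theorem pv_cand'_fun (d : PySem.Dict String String) (vs : List String) (i : Int) (v w : String)
    (hv : pvC' d vs 0 i v) (hw : pvC' d vs 0 i w) : v = w := by
  rcases hv with ⟨m, _, h1, h2, _⟩
  rcases hw with ⟨m', _, h1', h2', _⟩
  have hmm : m = m' := by omega
  subst hmm
  rw [h2] at h2'
  injection h2'

theorem pv_main (L : List (String × String)) (hnd : (L.map Prod.fst).Nodup)
    (k : String) (vs : List String) (hkv : (k, vs) ∈ pvFieldMap) :
    L.foldl (pvOstep k) none = pvFvIdx (PySem.Dict.mk L) vs 0 := by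
  have h1 := pv_fold_isMin k L
  have h2 := pv_fvIdx_isMin (PySem.Dict.mk L) vs 0
  have hiff := pv_cand_iff L hnd k vs hkv
  cases ho : L.foldl (pvOstep k) none with
  | none =>
    cases hf : pvFvIdx (PySem.Dict.mk L) vs 0 with
    | none => rfl
    | some iv =>
      exact absurd ((hiff iv.1 iv.2).mpr (h2.2 iv hf).1) (h1.1 ho iv.1 iv.2)
  | some iv =>
    cases hf : pvFvIdx (PySem.Dict.mk L) vs 0 with
    | none =>
      exact absurd ((hiff iv.1 iv.2).mp (h1.2 iv ho).1) (h2.1 hf iv.1 iv.2)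
    | some jw =>
      have ha := h1.2 iv ho
      have hb := h2.2 jw hf
      have hij : iv.1 = jw.1 :=
        le_antisymm (ha.2 jw.1 jw.2 ((hiff jw.1 jw.2).mpr hb.1))
          (hb.2 iv.1 iv.2 ((hiff iv.1 iv.2).mp ha.1))
      have hvw : iv.2 = jw.2 :=
        pv_cand'_fun (PySem.Dict.mk L) vs iv.1 iv.2 jw.2
          ((hiff iv.1 iv.2).mp ha.1) (hij ▸ hb.1)
      cases iv; cases jw
      simp_all

-- ===== VERDICT (by name: the statement is the Claim_ definition above) =====
theorem normalize_props_spec : Claim_equal_normalize_props := by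
  intro parsed _hdom hpre
  unfold Spec_normalize_props
  simp only [normalize_props, normalize_props_alt, pvValid_eq, pvStdOrder_eq, List.foldl_map]
  congr 1
  apply PySem.List.foldl_congr_mem
  intro acc kv hkv
  have hget := pv_best_get parsed PySem.Dict.empty kv.1
  rw [PySem.Dict.get?_empty] at hget
  rw [hget, pv_main parsed hpre kv.1 kv.2 (by simpa using hkv),
    pv_firstValid_eq_fvIdx (PySem.Dict.mk parsed) kv.2 0]
  cases pvFvIdx (PySem.Dict.mk parsed) kv.2 0 <;> rfl
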